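-- pv_equiv track=rewrite | github.com/Lyle-Kottke/520-Exercise-2 | problem7/solutions/solution1.py | solve
-- ===== SOURCE A (Python) =====
-- import math
--
-- def solve(n: int) -> tuple[int, int]:
--     """
--     Determines the coordinates (x, y) on a hexagonal grid after n moves
--     along a standard hexagonal spiral, starting at (0, 0).
--
--     The spiral is layered, with the k-th layer (k >= 1) having 6k steps,
--     for a total of S(k) = 3k^2 + 3k + 1 steps up to the end of layer k.
--
--     The coordinate system and movement vectors are chosen to be:
--     V0: (1, 0), V1: (1, 1), V2: (-1, 0), V3: (-1, -1), V4: (0, -1), V5: (1, 1)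
--
--     The problem examples (n=3 -> (-2, 0), n=7 -> (3, 2)) contradict the
--     standard spiral pattern based on the coordinate image, but this function
--     implements the mathematically consistent standard hexagonal spiral which
--     is the only way to solve for n up to 10^18.
--
--     :param n: The number of Ayrat's moves (0 <= n <= 10^18).
--     :return: A tuple (x, y) representing Ayrat's current coordinates.
--     """
--     if n == 0:
--         return 0, 0
--
--     # 1. Find Layer K
--     # S(K) = 3K^2 + 3K + 1 is the total steps up to the end of layer K.
--     # Find smallest K >= 1 such that n < S(K).
--     # Estimate K by solving 3K^2 approx n: K approx sqrt(n/3).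
--     # Since n <= 10^18, K <= 5.77 * 10^8.
--
--     k_est = int(math.sqrt(n / 3))
--
--     # Adjust K to find the correct layer
--     k = k_est
--
--     # S(k) = 3*k*(k+1) + 1
--     # Check if k needs to be increased
--     while 3 * k * (k + 1) + 1 <= n:
--         k += 1
--
--     # Check if k needs to be decreased (only necessary if k_est was slightly too high)
--     while k > 0 and 3 * (k - 1) * k + 1 > n:
--         k -= 1
--
--     # Now, k is the correct layer number (k >= 1)
--
--     # 2. Initial Position and Remaining Steps
--
--     # Total steps up to the START of layer K (end of layer K-1)
--     # n_start = S(K-1) = 3*(K-1)*K + 1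
--     n_start = 3 * (k - 1) * k + 1
--
--     # The starting coordinate for layer K (at n_start) is (K-1, 0)
--     x, y = k - 1, 0
--
--     # Remaining steps within layer K
--     r = n - n_start
--
--     # 3. Move Layer K
--
--     # The length of each segment is L = K
--     L = k
--
--     # Six movement vectors for the layer (chosen so their sum is (1, 0) for the layer)
--     # V0: (1, 0), V1: (1, 1), V2: (-1, 0), V3: (-1, -1), V4: (0, -1), V5: (1, 1)
--     # The directions are slightly adjusted from the standard to ensure the path
--     # reaches (K, 0) at the end of the 6K steps.
--     V = [(1, 0), (1, 1), (-1, 0), (-1, -1), (0, -1), (1, 1)]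
--
--     for vx, vy in V:
--         if r == 0:
--             break
--
--         steps = min(r, L)
--
--         x += steps * vx
--         y += steps * vy
--
--         r -= steps
--
--     return x, y
-- ===== SOURCE B (Python) =====
-- from math import isqrt
--
-- def solve(n: int) -> tuple[int, int]:
--     """Closed-form hexagonal spiral position: layer via integer sqrt, segment via divmod."""
--     if n == 0:
--         return 0, 0
--     # smallest k>=1 with n < 3k^2+3k+1, computed exactly: k = (isqrt(12n-3)+3)//6
--     s = isqrt(12 * n - 3)
--     k = (s + 3) // 6
--     r = n - (3 * (k - 1) * k + 1)
--     seg, off = divmod(r, k)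
--     V = [(1, 0), (1, 1), (-1, 0), (-1, -1), (0, -1), (1, 1)]
--     # prefix sums of V (contribution of the completed segments, each of length k)
--     P = [(0, 0), (1, 0), (2, 1), (1, 1), (0, 0), (0, -1)]
--     return (k - 1 + k * P[seg][0] + off * V[seg][0],
--             k * P[seg][1] + off * V[seg][1])
-- ===== Notes on version B (the rewrite author's own statement) =====
-- stated objective: simpler
-- what changed: Replaces the float-sqrt estimate plus two correction while-loops with an exact closed-form integer-sqrt layer index, and the six-iteration segment-peeling loop with a single divmod plus a prefix-sum table lookup.
import Mathlib
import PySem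

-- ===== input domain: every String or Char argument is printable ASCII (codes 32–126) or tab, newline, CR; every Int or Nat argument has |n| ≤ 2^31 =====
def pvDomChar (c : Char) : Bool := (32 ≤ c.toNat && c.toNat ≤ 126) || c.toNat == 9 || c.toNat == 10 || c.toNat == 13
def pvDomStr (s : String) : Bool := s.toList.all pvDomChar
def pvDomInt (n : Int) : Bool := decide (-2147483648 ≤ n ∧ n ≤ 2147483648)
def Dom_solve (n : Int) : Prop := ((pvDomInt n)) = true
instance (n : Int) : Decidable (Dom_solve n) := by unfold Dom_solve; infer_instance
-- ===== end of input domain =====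

-- B replaces A's float-sqrt estimate + two correction while-loops and the six-iteration
-- peeling loop by a closed-form layer index (exact integer sqrt) and a divmod/table lookup;
-- objective: simpler.

-- ===== PORT A =====
-- first while-loop: increase k while 3*k*(k+1)+1 <= n
def solveUp (n k : Int) : Int :=
  if 3 * k * (k + 1) + 1 ≤ n then solveUp n (k + 1) else k
termination_by (n - k).toNat
decreasing_by
  have hk : k < n := by nlinarith [sq_nonneg k, sq_nonneg (k + 1)]
  omega

-- second while-loop: decrease k while k > 0 and 3*(k-1)*k+1 > n
def solveDown (n k : Int) : Int :=
  if 0 < k ∧ 3 * (k - 1) * k + 1 > n then solveDown n (k - 1) else k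
termination_by k.toNat
decreasing_by omega

-- loop body of A's `for vx, vy in V`: state (x, y, r); the `break` on r == 0 is
-- modelled by leaving the state unchanged for the remaining iterations
def hexStep (L : Int) (s : Int × Int × Int) (v : Int × Int) : Int × Int × Int :=
  if s.2.2 = 0 then s
  else
    let steps := min s.2.2 L
    (s.1 + steps * v.1, s.2.1 + steps * v.2, s.2.2 - steps)

def solve (n : Int) : Int × Int :=
  if n = 0 then (0, 0)
  else
    -- int(math.sqrt(n / 3)) ported by hand as an integer sqrt of n // 3: it is only an
    -- ESTIMATE; the two correction loops below yield the same final k (hence the same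
    -- output) for every estimate, exactly as in the Python
    let kEst : Int := (Nat.sqrt (n.toNat / 3) : Nat)
    let k := solveDown n (solveUp n kEst)
    let nstart := 3 * (k - 1) * k + 1
    let r := n - nstart
    let V : List (Int × Int) := [(1, 0), (1, 1), (-1, 0), (-1, -1), (0, -1), (1, 1)]
    let st := V.foldl (hexStep k) (k - 1, 0, r)
    (st.1, st.2.1)

-- ===== PORT B =====
def solve_alt (n : Int) : Int × Int :=
  if n = 0 then (0, 0)
  else
    -- math.isqrt(12*n - 3), exact for n ≥ 1 (ported by hand via Nat.sqrt)
    let s : Int := (Nat.sqrt (12 * n - 3).toNat : Nat)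
    let k := PySem.Int.floordiv (s + 3) 6
    let r := n - (3 * (k - 1) * k + 1)
    let seg := PySem.Int.floordiv r k
    let off := PySem.Int.mod r k
    let V : List (Int × Int) := [(1, 0), (1, 1), (-1, 0), (-1, -1), (0, -1), (1, 1)]
    let P : List (Int × Int) := [(0, 0), (1, 0), (2, 1), (1, 1), (0, 0), (0, -1)]
    (k - 1 + k * (PySem.List.pyGetD P seg (0, 0)).1 + off * (PySem.List.pyGetD V seg (0, 0)).1,
     k * (PySem.List.pyGetD P seg (0, 0)).2 + off * (PySem.List.pyGetD V seg (0, 0)).2)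

-- ===== PRECONDITION & SPEC =====
-- Pre_ excludes negative n, on which A raises ValueError in math.sqrt
def Pre_solve (n : Int) : Prop := 0 ≤ n
instance (n : Int) : Decidable (Pre_solve n) := by unfold Pre_solve; infer_instance
def pvWitness_solve : Int := 7

def Spec_solve (n : Int) (out : Int × Int) : Prop := out = solve_alt n
instance (n : Int) (out : Int × Int) : Decidable (Spec_solve n out) := by unfold Spec_solve; infer_instance

-- ===== CLAIM (what is proved, stated in full; the proofs are below) =====
def Claim_equal_solve : Prop := ∀ (n : Int), Dom_solve n → Pre_solve n → Spec_solve n (solve n)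

-- ===== LEMMAS AND PROOFS =====

-- the unique layer of step n (n ≥ 1)
def GoodLayer (n k : Int) : Prop := 1 ≤ k ∧ 3 * (k - 1) * k + 1 ≤ n ∧ n < 3 * k * (k + 1) + 1

theorem goodLayer_unique {n k k' : Int} (h : GoodLayer n k) (h' : GoodLayer n k') : k = k' := by
  obtain ⟨hk1, hk2, hk3⟩ := h
  obtain ⟨hk1', hk2', hk3'⟩ := h'
  by_contra hne
  rcases lt_or_gt_of_ne hne with hlt | hlt
  · nlinarith
  · nlinarith

theorem solveUp_exit (n k : Int) : n < 3 * (solveUp n k) * (solveUp n k + 1) + 1 := by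
  unfold solveUp
  split
  · exact solveUp_exit n (k + 1)
  · omega
termination_by (n - k).toNat
decreasing_by
  have hk : k < n := by nlinarith [sq_nonneg k, sq_nonneg (k + 1)]
  omega

theorem solveDown_exit (n k : Int) :
    ¬(0 < solveDown n k ∧ 3 * (solveDown n k - 1) * (solveDown n k) + 1 > n) := by
  unfold solveDown
  split
  · exact solveDown_exit n (k - 1)
  · assumption
termination_by k.toNat
decreasing_by omega

theorem solveDown_inv (n k : Int) (h : n < 3 * k * (k + 1) + 1) :
    n < 3 * (solveDown n k) * (solveDown n k + 1) + 1 := by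
  unfold solveDown
  split
  · rename_i hc
    exact solveDown_inv n (k - 1) (by nlinarith [hc.2])
  · exact h
termination_by k.toNat
decreasing_by omega

theorem solveDown_nonneg (n k : Int) (h : 0 ≤ k) : 0 ≤ solveDown n k := by
  unfold solveDown
  split
  · rename_i hc
    exact solveDown_nonneg n (k - 1) (by omega)
  · exact h
termination_by k.toNat
decreasing_by omega

theorem solveUp_ge (n k : Int) : k ≤ solveUp n k := by
  unfold solveUp
  split
  · have := solveUp_ge n (k + 1); omega
  · omega
termination_by (n - k).toNat
decreasing_by
  have hk : k < n := by nlinarith [sq_nonneg k, sq_nonneg (k + 1)]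
  omega

-- A's layer search lands on the unique good layer
theorem goodLayer_A (n k0 : Int) (hn : 1 ≤ n) (hk0 : 0 ≤ k0) :
    GoodLayer n (solveDown n (solveUp n k0)) := by
  set k1 := solveUp n k0 with hk1
  have hup : n < 3 * k1 * (k1 + 1) + 1 := solveUp_exit n k0
  have hge : 0 ≤ k1 := le_trans hk0 (solveUp_ge n k0)
  set m := solveDown n k1 with hm
  have hinv : n < 3 * m * (m + 1) + 1 := solveDown_inv n k1 hup
  have hnn : 0 ≤ m := solveDown_nonneg n k1 hge
  have hexit := solveDown_exit n k1
  have hpos : 0 < m := by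
    rcases eq_or_lt_of_le hnn with h0 | h0
    · exfalso; rw [← h0] at hinv; omega
    · exact h0
  refine ⟨hpos, ?_, hinv⟩
  rw [← hm] at hexit
  omega

-- B's closed-form layer is the unique good layer
theorem goodLayer_B (n : Int) (hn : 1 ≤ n) :
    GoodLayer n (PySem.Int.floordiv ((Nat.sqrt (12 * n - 3).toNat : Nat) + 3) 6) := by
  set s : Int := ((Nat.sqrt (12 * n - 3).toNat : Nat) : Int) with hs
  have hs0 : 0 ≤ s := by positivity
  have harg : ((12 * n - 3).toNat : Int) = 12 * n - 3 := by omega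
  have hlow : s * s ≤ 12 * n - 3 := by
    have h1 : (Nat.sqrt (12 * n - 3).toNat) * (Nat.sqrt (12 * n - 3).toNat) ≤ (12 * n - 3).toNat := by
      have := Nat.sqrt_le' (12 * n - 3).toNat
      nlinarith
    have h2 : ((Nat.sqrt (12 * n - 3).toNat : Nat) : Int) * ((Nat.sqrt (12 * n - 3).toNat : Nat) : Int)
        ≤ ((12 * n - 3).toNat : Int) := by exact_mod_cast h1
    rw [← hs] at h2
    omega
  have hhigh : 12 * n - 3 < (s + 1) * (s + 1) := by
    have h1 : (12 * n - 3).toNat < (Nat.sqrt (12 * n - 3).toNat + 1) * (Nat.sqrt (12 * n - 3).toNat + 1) := by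
      have := Nat.lt_succ_sqrt' (12 * n - 3).toNat
      nlinarith
    have h2 : ((12 * n - 3).toNat : Int)
        < (((Nat.sqrt (12 * n - 3).toNat : Nat) : Int) + 1) * (((Nat.sqrt (12 * n - 3).toNat : Nat) : Int) + 1) := by
      exact_mod_cast h1
    rw [← hs] at h2
    omega
  rw [PySem.Int.floordiv_eq_ediv_of_pos (by omega)]
  set k := (s + 3) / 6 with hk
  have hdiv : 6 * k ≤ s + 3 ∧ s + 3 < 6 * k + 6 := by omega
  have hs3 : 3 ≤ s := by nlinarith
  have hk1 : 1 ≤ k := by omega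
  refine ⟨hk1, ?_, ?_⟩
  · -- 3(k-1)k+1 ≤ n  from (6k-3)² ≤ s² ≤ 12n-3
    have h1 : 6 * k - 3 ≤ s := by omega
    have h2 : (6 * k - 3) * (6 * k - 3) ≤ s * s := by nlinarith
    nlinarith
  · -- n < 3k(k+1)+1  from 12n-3 < (s+1)² ≤ (6k+3)²
    have h1 : s + 1 ≤ 6 * k + 3 := by omega
    have h2 : (s + 1) * (s + 1) ≤ (6 * k + 3) * (6 * k + 3) := by nlinarith
    nlinarith

-- the six-way peeling fold equals the divmod/table formula, for 1 ≤ k, 0 ≤ r < 6k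
-- once r = 0, A's loop state never changes ('break')
theorem foldl_break (L : Int) (vs : List (Int × Int)) (x y : Int) :
    List.foldl (hexStep L) (x, y, 0) vs = (x, y, 0) := by
  induction vs with
  | nil => rfl
  | cons v vs ih => simpa [List.foldl, hexStep] using ih

-- a full segment of length L is consumed
theorem foldl_full (L x y r : Int) (v : Int × Int) (vs : List (Int × Int))
    (h0 : r ≠ 0) (hL : L ≤ r) :
    List.foldl (hexStep L) (x, y, r) (v :: vs)
      = List.foldl (hexStep L) (x + L * v.1, y + L * v.2, r - L) vs := by
  simp [List.foldl, hexStep, h0, min_eq_right hL]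

-- the final, partial segment is consumed and r becomes 0
theorem foldl_part (L x y r : Int) (v : Int × Int) (vs : List (Int × Int))
    (h0 : r ≠ 0) (hL : r ≤ L) :
    List.foldl (hexStep L) (x, y, r) (v :: vs)
      = List.foldl (hexStep L) (x + r * v.1, y + r * v.2, 0) vs := by
  simp [List.foldl, hexStep, h0, min_eq_left hL]

set_option maxHeartbeats 1000000 in
theorem fold_eq_table (k r : Int) (hk : 1 ≤ k) (hr0 : 0 ≤ r) (hr6 : r < 6 * k) :
    (let st := ([(1, 0), (1, 1), (-1, 0), (-1, -1), (0, -1), (1, 1)] : List (Int × Int)).foldl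
        (hexStep k) (k - 1, 0, r)
     ((st.1, st.2.1) : Int × Int))
    = (k - 1 + k * (PySem.List.pyGetD ([(0, 0), (1, 0), (2, 1), (1, 1), (0, 0), (0, -1)] : List (Int × Int)) (PySem.Int.floordiv r k) (0, 0)).1
         + (PySem.Int.mod r k) * (PySem.List.pyGetD ([(1, 0), (1, 1), (-1, 0), (-1, -1), (0, -1), (1, 1)] : List (Int × Int)) (PySem.Int.floordiv r k) (0, 0)).1,
       k * (PySem.List.pyGetD ([(0, 0), (1, 0), (2, 1), (1, 1), (0, 0), (0, -1)] : List (Int × Int)) (PySem.Int.floordiv r k) (0, 0)).2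
         + (PySem.Int.mod r k) * (PySem.List.pyGetD ([(1, 0), (1, 1), (-1, 0), (-1, -1), (0, -1), (1, 1)] : List (Int × Int)) (PySem.Int.floordiv r k) (0, 0)).2) := by
  rw [PySem.Int.floordiv_eq_ediv_of_pos (by omega), PySem.Int.mod_eq_emod_of_pos (by omega)]
  obtain ⟨q, o, hq, ho⟩ : ∃ q o : Int, r / k = q ∧ r % k = o := ⟨r / k, r % k, rfl, rfl⟩
  have hm0 : 0 ≤ o := ho ▸ Int.emod_nonneg r (by omega)
  have hmk : o < k := ho ▸ Int.emod_lt_of_pos r (by omega)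
  have hq0 : 0 ≤ q := hq ▸ Int.ediv_nonneg hr0 (by omega)
  have hrqo : r = q * k + o := by
    rw [← hq, ← ho, mul_comm]
    exact (Int.ediv_add_emod r k).symm
  have hq5 : q ≤ 5 := by nlinarith
  have hqc : q = 0 ∨ q = 1 ∨ q = 2 ∨ q = 3 ∨ q = 4 ∨ q = 5 := by omega
  rw [hq, ho, hrqo]
  rcases hqc with h | h | h | h | h | h <;> subst h
  · dsimp only
    by_cases ho2 : o = 0
    · subst ho2
      rw [show ((0:Int)*k+0 : Int) = 0 by ring]
      rw [foldl_break]
      norm_num [PySem.List.pyGetD, PySem.List.pyIdx?, Prod.mk.injEq]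
      try simp only [show (2:Int).toNat = 2 from rfl, show (3:Int).toNat = 3 from rfl,
        show (4:Int).toNat = 4 from rfl, show (5:Int).toNat = 5 from rfl]
      try norm_num
      try omega
    · rw [foldl_part _ _ _ _ _ _ (by omega) (by omega)]
      rw [foldl_break]
      norm_num [PySem.List.pyGetD, PySem.List.pyIdx?, Prod.mk.injEq]
      try simp only [show (2:Int).toNat = 2 from rfl, show (3:Int).toNat = 3 from rfl,
        show (4:Int).toNat = 4 from rfl, show (5:Int).toNat = 5 from rfl]
      try norm_num
      try omega
  · dsimp only
    by_cases ho2 : o = 0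
    · subst ho2
      rw [foldl_part _ _ _ _ _ _ (by omega) (by omega)]
      rw [foldl_break]
      norm_num [PySem.List.pyGetD, PySem.List.pyIdx?, Prod.mk.injEq]
      try simp only [show (2:Int).toNat = 2 from rfl, show (3:Int).toNat = 3 from rfl,
        show (4:Int).toNat = 4 from rfl, show (5:Int).toNat = 5 from rfl]
      try norm_num
      try omega
    · rw [foldl_full _ _ _ _ _ _ (by omega) (by omega)]
      rw [foldl_part _ _ _ _ _ _ (by omega) (by omega)]
      rw [foldl_break]
      norm_num [PySem.List.pyGetD, PySem.List.pyIdx?, Prod.mk.injEq]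
      try simp only [show (2:Int).toNat = 2 from rfl, show (3:Int).toNat = 3 from rfl,
        show (4:Int).toNat = 4 from rfl, show (5:Int).toNat = 5 from rfl]
      try norm_num
      try omega
  · dsimp only
    by_cases ho2 : o = 0
    · subst ho2
      rw [foldl_full _ _ _ _ _ _ (by omega) (by omega)]
      rw [foldl_part _ _ _ _ _ _ (by omega) (by omega)]
      rw [foldl_break]
      norm_num [PySem.List.pyGetD, PySem.List.pyIdx?, Prod.mk.injEq]
      try simp only [show (2:Int).toNat = 2 from rfl, show (3:Int).toNat = 3 from rfl,
        show (4:Int).toNat = 4 from rfl, show (5:Int).toNat = 5 from rfl]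
      try norm_num
      try omega
    · rw [foldl_full _ _ _ _ _ _ (by omega) (by omega)]
      rw [foldl_full _ _ _ _ _ _ (by omega) (by omega)]
      rw [foldl_part _ _ _ _ _ _ (by omega) (by omega)]
      rw [foldl_break]
      norm_num [PySem.List.pyGetD, PySem.List.pyIdx?, Prod.mk.injEq]
      try simp only [show (2:Int).toNat = 2 from rfl, show (3:Int).toNat = 3 from rfl,
        show (4:Int).toNat = 4 from rfl, show (5:Int).toNat = 5 from rfl]
      try norm_num
      try omega
  · dsimp only
    by_cases ho2 : o = 0
    · subst ho2
      rw [foldl_full _ _ _ _ _ _ (by omega) (by omega)]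
      rw [foldl_full _ _ _ _ _ _ (by omega) (by omega)]
      rw [foldl_part _ _ _ _ _ _ (by omega) (by omega)]
      rw [foldl_break]
      norm_num [PySem.List.pyGetD, PySem.List.pyIdx?, Prod.mk.injEq]
      try simp only [show (2:Int).toNat = 2 from rfl, show (3:Int).toNat = 3 from rfl,
        show (4:Int).toNat = 4 from rfl, show (5:Int).toNat = 5 from rfl]
      try norm_num
      try omega
    · rw [foldl_full _ _ _ _ _ _ (by omega) (by omega)]
      rw [foldl_full _ _ _ _ _ _ (by omega) (by omega)]
      rw [foldl_full _ _ _ _ _ _ (by omega) (by omega)]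
      rw [foldl_part _ _ _ _ _ _ (by omega) (by omega)]
      rw [foldl_break]
      norm_num [PySem.List.pyGetD, PySem.List.pyIdx?, Prod.mk.injEq]
      try simp only [show (2:Int).toNat = 2 from rfl, show (3:Int).toNat = 3 from rfl,
        show (4:Int).toNat = 4 from rfl, show (5:Int).toNat = 5 from rfl]
      try norm_num
      try omega
  · dsimp only
    by_cases ho2 : o = 0
    · subst ho2
      rw [foldl_full _ _ _ _ _ _ (by omega) (by omega)]
      rw [foldl_full _ _ _ _ _ _ (by omega) (by omega)]
      rw [foldl_full _ _ _ _ _ _ (by omega) (by omega)]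
      rw [foldl_part _ _ _ _ _ _ (by omega) (by omega)]
      rw [foldl_break]
      norm_num [PySem.List.pyGetD, PySem.List.pyIdx?, Prod.mk.injEq]
      try simp only [show (2:Int).toNat = 2 from rfl, show (3:Int).toNat = 3 from rfl,
        show (4:Int).toNat = 4 from rfl, show (5:Int).toNat = 5 from rfl]
      try norm_num
      try omega
    · rw [foldl_full _ _ _ _ _ _ (by omega) (by omega)]
      rw [foldl_full _ _ _ _ _ _ (by omega) (by omega)]
      rw [foldl_full _ _ _ _ _ _ (by omega) (by omega)]
      rw [foldl_full _ _ _ _ _ _ (by omega) (by omega)]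
      rw [foldl_part _ _ _ _ _ _ (by omega) (by omega)]
      rw [foldl_break]
      norm_num [PySem.List.pyGetD, PySem.List.pyIdx?, Prod.mk.injEq]
      try simp only [show (2:Int).toNat = 2 from rfl, show (3:Int).toNat = 3 from rfl,
        show (4:Int).toNat = 4 from rfl, show (5:Int).toNat = 5 from rfl]
      try norm_num
      try omega
  · dsimp only
    by_cases ho2 : o = 0
    · subst ho2
      rw [foldl_full _ _ _ _ _ _ (by omega) (by omega)]
      rw [foldl_full _ _ _ _ _ _ (by omega) (by omega)]
      rw [foldl_full _ _ _ _ _ _ (by omega) (by omega)]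
      rw [foldl_full _ _ _ _ _ _ (by omega) (by omega)]
      rw [foldl_part _ _ _ _ _ _ (by omega) (by omega)]
      rw [foldl_break]
      norm_num [PySem.List.pyGetD, PySem.List.pyIdx?, Prod.mk.injEq]
      try simp only [show (2:Int).toNat = 2 from rfl, show (3:Int).toNat = 3 from rfl,
        show (4:Int).toNat = 4 from rfl, show (5:Int).toNat = 5 from rfl]
      try norm_num
      try omega
    · rw [foldl_full _ _ _ _ _ _ (by omega) (by omega)]
      rw [foldl_full _ _ _ _ _ _ (by omega) (by omega)]
      rw [foldl_full _ _ _ _ _ _ (by omega) (by omega)]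
      rw [foldl_full _ _ _ _ _ _ (by omega) (by omega)]
      rw [foldl_full _ _ _ _ _ _ (by omega) (by omega)]
      rw [foldl_part _ _ _ _ _ _ (by omega) (by omega)]
      rw [foldl_break]
      norm_num [PySem.List.pyGetD, PySem.List.pyIdx?, Prod.mk.injEq]
      try simp only [show (2:Int).toNat = 2 from rfl, show (3:Int).toNat = 3 from rfl,
        show (4:Int).toNat = 4 from rfl, show (5:Int).toNat = 5 from rfl]
      try norm_num
      try omega

-- ===== VERDICT (by name: the statement is the Claim_ definition above) =====
theorem solve_spec : Claim_equal_solve := by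
  intro n _ hpre
  unfold Spec_solve solve solve_alt
  by_cases hn : n = 0
  · simp [hn]
  · have hn1 : 1 ≤ n := by unfold Pre_solve at hpre; omega
    simp only [if_neg hn]
    have hA : GoodLayer n (solveDown n (solveUp n ((Nat.sqrt (n.toNat / 3) : Nat) : Int))) :=
      goodLayer_A n _ hn1 (by positivity)
    have hB : GoodLayer n (PySem.Int.floordiv ((Nat.sqrt (12 * n - 3).toNat : Nat) + 3) 6) :=
      goodLayer_B n hn1
    have hkeq : solveDown n (solveUp n ((Nat.sqrt (n.toNat / 3) : Nat) : Int))
        = PySem.Int.floordiv ((Nat.sqrt (12 * n - 3).toNat : Nat) + 3) 6 :=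
      goodLayer_unique hA hB
    rw [hkeq]
    set k := PySem.Int.floordiv ((Nat.sqrt (12 * n - 3).toNat : Nat) + 3) 6 with hk
    rw [hkeq] at hA
    obtain ⟨hk1, hlo, hhi⟩ := hA
    exact fold_eq_table k (n - (3 * (k - 1) * k + 1)) hk1 (by omega) (by nlinarith)
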